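-- pv_equiv track=rewrite | github.com/BruceChen07/AI-Law-Assistant | app/memory_system/experience_repo.py | _build_legal_basis
-- ===== SOURCE A (Python) =====
-- from typing import Any, Dict, List, Optional
--
-- def _build_legal_basis(risks: List[Dict[str, Any]], limit: int = 5) -> List[str]:
--     out: List[str] = []
--     seen = set()
--     for item in list(risks or []):
--         if not isinstance(item, dict):
--             continue
--         law_title = str(item.get("law_title") or "").strip()
--         article_no = str(item.get("article_no") or "").strip()
--         basis = f"{law_title} {article_no}".strip()
--         if not basis or basis in seen:
--             continue
--         seen.add(basis)
--         out.append(basis)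
--         if len(out) >= max(1, int(limit or 1)):
--             break
--     return out
-- ===== SOURCE B (Python) =====
-- from typing import Any, Dict, List
--
-- def _build_legal_basis(risks: List[Dict[str, Any]], limit: int = 5) -> List[str]:
--     bases = [b for b in (
--         f"{str(d.get('law_title') or '').strip()} {str(d.get('article_no') or '').strip()}".strip()
--         for d in (risks or []) if isinstance(d, dict)) if b]
--     out: List[str] = []
--     k = max(1, int(limit or 1))
--     while bases and k > 0:
--         head = bases[0]
--         out.append(head)
--         bases = [x for x in bases[1:] if x != head]
--         k -= 1
--     return out
-- ===== Notes on version B (the rewrite author's own statement) =====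
-- stated objective: alternative
-- what changed: A's stateful loop (seen-set membership test + output accumulator + early break at the clamped limit) is replaced by duplicate-elimination by filtering: B first materialises the list of nonempty basis strings, then repeatedly emits its first element and filters every later occurrence of it out of the remainder, decrementing the clamped limit as the loop counter - there is no seen set and no membership test against accumulated state.
import Mathlib
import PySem

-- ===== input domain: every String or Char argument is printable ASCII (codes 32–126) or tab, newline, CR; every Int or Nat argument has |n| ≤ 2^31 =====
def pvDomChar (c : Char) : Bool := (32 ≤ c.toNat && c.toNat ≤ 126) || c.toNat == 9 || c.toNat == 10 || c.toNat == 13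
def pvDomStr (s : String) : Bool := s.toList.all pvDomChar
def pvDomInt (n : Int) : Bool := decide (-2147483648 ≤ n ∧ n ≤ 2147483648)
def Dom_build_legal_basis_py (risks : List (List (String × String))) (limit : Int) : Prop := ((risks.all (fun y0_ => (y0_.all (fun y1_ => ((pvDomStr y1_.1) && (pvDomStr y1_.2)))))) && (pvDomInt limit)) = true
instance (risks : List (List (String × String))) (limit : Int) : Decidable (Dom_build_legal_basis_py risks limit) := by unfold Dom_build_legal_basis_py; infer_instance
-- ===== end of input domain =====

-- B drops A's seen-set/early-break loop and instead removes duplicates by repeatedly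
-- emitting the first remaining basis and filtering its later occurrences out of the rest
-- (the clamped limit is the loop counter); an alternative decomposition, equality proved.
-- ===== PORT A =====
-- shared by both ports: Python's f"{str(d.get('law_title') or '').strip()} {str(d.get('article_no') or '').strip()}".strip(),
-- identical in A and B ('x or ""' collapses None and "" to "", which getD with default "" reproduces exactly)
def basisOf (item : List (String × String)) : String :=
  let law_title := PySem.Str.strip ((PySem.Dict.mk item).getD "law_title" "")
  let article_no := PySem.Str.strip ((PySem.Dict.mk item).getD "article_no" "")
  PySem.Str.strip (law_title ++ " " ++ article_no)

-- A's for-loop: seen set, out accumulator, 'continue' on empty/duplicate basis, break once len(out) >= clamp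
def legalLoop (items : List (List (String × String))) (seen : PySem.Set String) (out : List String) (k : Int) : List String :=
  match items with
  | [] => out
  | item :: rest =>
      let basis := basisOf item
      if basis == "" || seen.contains basis then legalLoop rest seen out k
      else
        let seen' := seen.add basis
        let out' := out ++ [basis]
        if k ≤ (out'.length : Int) then out' else legalLoop rest seen' out' k

def build_legal_basis_py (risks : List (List (String × String))) (limit : Int) : List String :=
  legalLoop risks PySem.Set.empty [] (max 1 (if limit == 0 then 1 else limit))

-- ===== PORT B =====
-- B's while loop: emit the first remaining basis, filter its duplicates out of the tail, count the clamp down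
def nubTake (bases : List String) (k : Int) : List String :=
  match bases with
  | [] => []
  | head :: rest =>
      if k ≤ 0 then []
      else head :: nubTake (rest.filter (fun x => !(x == head))) (k - 1)
termination_by bases.length
decreasing_by
  simp only [List.length_unattach, List.length_cons]
  exact Nat.lt_succ_of_le (le_trans (List.length_filter_le _ _) (Nat.le_of_eq (List.length_attach (l := rest))))

def build_legal_basis_py_alt (risks : List (List (String × String))) (limit : Int) : List String :=
  let bases := (risks.map basisOf).filter (fun b => !(b == ""))
  nubTake bases (max 1 (if limit == 0 then 1 else limit))

-- ===== PRECONDITION & SPEC =====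
def Spec_build_legal_basis_py (risks : List (List (String × String))) (limit : Int) (out : List String) : Prop := out = build_legal_basis_py_alt risks limit
instance (risks : List (List (String × String))) (limit : Int) (out : List String) : Decidable (Spec_build_legal_basis_py risks limit out) := by unfold Spec_build_legal_basis_py; infer_instance

-- ===== CLAIM (what is proved, stated in full; the proofs are below) =====
def Claim_equal_build_legal_basis_py : Prop := ∀ (risks : List (List (String × String))) (limit : Int), Dom_build_legal_basis_py risks limit → Spec_build_legal_basis_py risks limit (build_legal_basis_py risks limit)

-- ===== LEMMAS AND PROOFS =====

-- unlimited version of B's filtering loop, the common yardstick both ports are reduced to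
def nubF (bases : List String) : List String :=
  match bases with
  | [] => []
  | head :: rest => head :: nubF (rest.filter (fun x => !(x == head)))
termination_by bases.length
decreasing_by
  simp only [List.length_unattach, List.length_cons]
  exact Nat.lt_succ_of_le (le_trans (List.length_filter_le _ _) (Nat.le_of_eq (List.length_attach (l := rest))))

lemma nubTake_nil (k : Int) : nubTake [] k = [] := by simp [nubTake]
lemma nubTake_cons (h : String) (t : List String) (k : Int) :
    nubTake (h :: t) k = if k ≤ 0 then [] else h :: nubTake (t.filter (fun x => !(x == h))) (k - 1) := by
  rw [nubTake.eq_def]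
lemma nubF_nil : nubF [] = [] := by simp [nubF]
lemma nubF_cons (h : String) (t : List String) :
    nubF (h :: t) = h :: nubF (t.filter (fun x => !(x == h))) := by
  rw [nubF.eq_def]

-- B's loop is the unlimited nub truncated to the clamp
lemma nubTake_eq_take : ∀ (n : Nat) (xs : List String) (k : Int), xs.length ≤ n →
    nubTake xs k = (nubF xs).take k.toNat := by
  intro n
  induction n with
  | zero =>
      intro xs k h
      have : xs = [] := List.eq_nil_of_length_eq_zero (Nat.le_zero.mp h)
      simp [this, nubTake_nil, nubF_nil]
  | succ m ih =>
      intro xs k h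
      match xs with
      | [] => simp [nubTake_nil, nubF_nil]
      | head :: rest =>
          by_cases hk : k ≤ 0
          · have h0 : k.toNat = 0 := by omega
            simp [nubTake_cons, hk, h0]
          · have hlen : (rest.filter (fun x => !(x == head))).length ≤ m :=
              le_trans (List.length_filter_le _ _) (by simpa using Nat.lt_succ_iff.mp (lt_of_lt_of_le (Nat.lt_succ_of_le le_rfl) h))
            have htn : k.toNat = (k - 1).toNat + 1 := by omega
            rw [nubTake_cons, nubF_cons, if_neg hk, htn, List.take_succ_cons]
            exact congrArg _ (ih _ (k - 1) hlen)

-- Set.add-folding only ever appends: the accumulator is a prefix of the fold's result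
lemma foldl_add_prefix (bs : List String) : ∀ acc : List String,
    acc <+: List.foldl PySem.Set.add acc bs := by
  induction bs with
  | nil => intro acc; simp [List.foldl]
  | cons b rest ih =>
      intro acc
      refine List.IsPrefix.trans ?_ (ih (PySem.Set.add acc b))
      by_cases h : b ∈ acc
      · simp [PySem.Set.add, h]
      · simp [PySem.Set.add, h]

-- the seen-set fold is acc ++ the filtering nub of the elements not already seen
lemma foldl_add_eq_nubF : ∀ (xs acc : List String),
    List.foldl PySem.Set.add acc xs = acc ++ nubF (xs.filter (fun x => !(acc.contains x))) := by
  intro xs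
  induction xs with
  | nil => intro acc; simp [List.foldl, nubF_nil]
  | cons h t ih =>
      intro acc
      by_cases hm : h ∈ acc
      · have hc : acc.contains h = true := by simpa using hm
        simpa [List.foldl, PySem.Set.add, hm, hc] using ih acc
      · have hc : acc.contains h = false := by simpa using hm
        have hadd : PySem.Set.add acc h = acc ++ [h] := by simp [PySem.Set.add, hm]
        have hfeq : t.filter (fun x => !((acc ++ [h]).contains x))
            = (t.filter (fun x => !(acc.contains x))).filter (fun x => !(x == h)) := by
          rw [List.filter_filter]
          refine List.filter_congr ?_
          intro x _
          by_cases hx : x = h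
          · simp [hx]
          · simp [hx]
        have hhead : (h :: t).filter (fun x => !(acc.contains x))
            = h :: (t.filter (fun x => !(acc.contains x))) := by
          simp [List.filter, hm]
        calc List.foldl PySem.Set.add acc (h :: t)
            = List.foldl PySem.Set.add (acc ++ [h]) t := by simp [List.foldl, hadd]
          _ = (acc ++ [h]) ++ nubF (t.filter (fun x => !((acc ++ [h]).contains x))) := ih _
          _ = acc ++ nubF ((h :: t).filter (fun x => !(acc.contains x))) := by
                rw [hfeq, hhead, nubF_cons]
                simp

-- A's loop with seen = out, entered while out is still short of k, computes the
-- truncated Set.add-fold over the nonempty bases of the remaining items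
lemma legalLoop_eq (k : Int) : ∀ (items : List (List (String × String))) (out : List String),
    (out.length : Int) < k →
    legalLoop items out out k
      = (List.foldl PySem.Set.add out ((items.map basisOf).filter (fun b => !(b == "")))).take k.toNat := by
  intro items
  induction items with
  | nil =>
      intro out h
      simp only [legalLoop, List.map, List.filter, List.foldl]
      exact (List.take_of_length_le (by omega)).symm
  | cons item rest ih =>
      intro out h
      by_cases hempty : basisOf item == ""
      · simpa [legalLoop, hempty] using ih out h
      · by_cases hm : basisOf item ∈ out
        · simpa [legalLoop, PySem.Set.add, hempty, hm] using ih out h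
        · have hadd : PySem.Set.add out (basisOf item) = out ++ [basisOf item] := by
            simp [PySem.Set.add, hm]
          by_cases hstop : k ≤ (out.length : Int) + 1
          · have hk : k.toNat = out.length + 1 := by omega
            have heq := List.prefix_iff_eq_take.mp
              (foldl_add_prefix ((rest.map basisOf).filter (fun b => !(b == ""))) (out ++ [basisOf item]))
            simp [legalLoop, hempty, hm, hstop, hk]
            simpa [List.length_append] using heq
          · have h' : ((out ++ [basisOf item]).length : Int) < k := by
              simp only [List.length_append, List.length_cons, List.length_nil]
              push_cast
              omega
            have hrec := ih (out ++ [basisOf item]) h'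
            simp [legalLoop, hempty, hm, hstop]
            simpa using hrec

-- ===== VERDICT (by name: the statement is the Claim_ definition above) =====
theorem build_legal_basis_py_spec : Claim_equal_build_legal_basis_py := by
  intro risks limit _
  show build_legal_basis_py risks limit = build_legal_basis_py_alt risks limit
  unfold build_legal_basis_py build_legal_basis_py_alt
  have hk : (1:Int) ≤ max 1 (if limit == 0 then 1 else limit) := le_max_left _ _
  rw [show (PySem.Set.empty : PySem.Set String) = ([] : List String) from rfl,
      legalLoop_eq _ risks [] (by simp),
      foldl_add_eq_nubF]
  simp only [List.contains_nil, Bool.not_false, List.filter_true, List.nil_append]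
  exact (nubTake_eq_take _ _ _ le_rfl).symm
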